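-- pv_equiv track=rewrite | github.com/raymon-02/uwq-algo | 23_hw/01_two_edge_connected_graph.py | two_edge_connected
-- ===== SOURCE A (Python) =====
-- def two_edge_connected(graph):
--     time_in = [-1] * len(graph)
--
--     def dfs(v, prev, time):
--         time_in[v] = time
--         v_time = time
--
--         for to in graph[v]:
--             if to == prev:
--                 continue
--             if time_in[to] != -1:
--                 v_time = min(v_time, time_in[to])
--             else:
--                 to_time = dfs(to, v, time + 1)
--                 v_time = min(v_time, to_time)
--
--         if v_time == time and prev != -1:
--             return -1
--
--         return v_time
--
--     if dfs(0, -1, 0) == -1: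
--         return False
--
--     return all(map(lambda el: el >= 0, time_in))
-- ===== SOURCE B (Python) =====
-- def two_edge_connected(graph):
--     n = len(graph)
--     tin = [-1] * n
--     low = [-1] * n
--     tin[0] = 0
--     low[0] = 0
--     stack = [(0, -1, iter(graph[0]))]
--     res = 0
--     while stack:
--         v, prev, it = stack[-1]
--         to = next(it, None)
--         if to is None:
--             stack.pop()
--             r = -1 if (low[v] == tin[v] and prev != -1) else low[v]
--             if stack:
--                 low[prev] = min(low[prev], r)
--             else:
--                 res = r
--         elif to == prev:
--             continue
--         elif tin[to] != -1:
--             low[v] = min(low[v], tin[to])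
--         else:
--             tin[to] = tin[v] + 1
--             low[to] = tin[to]
--             stack.append((to, v, iter(graph[to])))
--     if res == -1:
--         return False
--     return all(t >= 0 for t in tin)
-- ===== Notes on version B (the rewrite author's own statement) =====
-- stated objective: alternative
-- what changed: The recursive nested dfs is replaced by an iterative explicit-stack DFS that keeps (vertex, parent, remaining-neighbours) frames and a low[] array, folding a popped frame's low value into the frame below; the recursion (and Python's recursion limit) disappears.
-- outside the precondition, e.g. on two_edge_connected([]): A raises IndexError, B raises IndexError; on two_edge_connected([[-1], [9]]): A returns False, B returns False
import Mathlib
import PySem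

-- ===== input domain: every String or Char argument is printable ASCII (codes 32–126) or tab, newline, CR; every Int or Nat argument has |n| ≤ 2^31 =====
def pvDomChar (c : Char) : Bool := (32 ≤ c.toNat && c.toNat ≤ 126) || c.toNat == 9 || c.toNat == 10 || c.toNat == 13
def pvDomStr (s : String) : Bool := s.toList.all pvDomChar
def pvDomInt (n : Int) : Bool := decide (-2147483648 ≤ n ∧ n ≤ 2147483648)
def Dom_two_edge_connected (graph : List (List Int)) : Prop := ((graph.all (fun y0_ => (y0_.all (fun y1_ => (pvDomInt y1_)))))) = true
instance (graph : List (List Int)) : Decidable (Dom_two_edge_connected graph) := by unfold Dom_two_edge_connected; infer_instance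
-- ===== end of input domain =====

-- B replaces A's recursive bridge-finding DFS by an explicit-stack iterative DFS over the
-- same traversal order (equivalence is about the return value; A mutates no argument).

-- Python's list indexing l[i] for -len l ≤ i < len l (negative i counts from the end);
-- shared by both ports, exact on indices in that range.
def pyIx (i : Int) (m : Nat) : Nat := (if i < 0 then i + m else i).toNat

-- ===== PORT A =====
-- A's nested `dfs` (recursion fueled; under Pre_ the fuel graph.length+1 is never exhausted,
-- see the proofs below) and its neighbour loop, ported as the mutual pair dfsA/dfsLoopA.
mutual
def dfsA (fuel : Nat) (g : List (List Int)) (v prev time : Int) (tin : List Int) :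
    Option (Int × List Int) :=
  match fuel with
  | 0 => none
  | f + 1 =>
    -- time_in[v] = time; v_time = time; for to in graph[v]: …
    match dfsLoopA f g v prev time (g.getD (pyIx v g.length) []) time
        (tin.set (pyIx v g.length) time) with
    | none => none
    | some (vt, tin2) =>
      if vt = time ∧ prev ≠ -1 then some (-1, tin2) else some (vt, tin2)
termination_by (fuel, 0)

def dfsLoopA (fuel : Nat) (g : List (List Int)) (v prev time : Int) (ns : List Int)
    (vt : Int) (tin : List Int) : Option (Int × List Int) :=
  match ns with
  | [] => some (vt, tin)
  | u :: rest =>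
    if u = prev then dfsLoopA fuel g v prev time rest vt tin
    else if tin.getD (pyIx u g.length) 0 ≠ -1 then
      dfsLoopA fuel g v prev time rest (min vt (tin.getD (pyIx u g.length) 0)) tin
    else
      match dfsA fuel g u v (time + 1) tin with
      | none => none
      | some (tt, tin') => dfsLoopA fuel g v prev time rest (min vt tt) tin'
termination_by (fuel, ns.length + 1)
end

def two_edge_connected (graph : List (List Int)) : Bool :=
  match dfsA (graph.length + 1) graph 0 (-1) 0 (List.replicate graph.length (-1)) with
  | none => false
  | some (r, tinf) =>
    if r = -1 then false
    else tinf.all (fun el => decide (el ≥ 0))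

-- ===== PORT B =====
-- B's while-loop over the explicit stack of (vertex, parent, remaining-neighbours) frames;
-- `fuel` bounds only the number of stack pushes (under Pre_, graph.length is never exhausted).
def runB (g : List (List Int)) (fuel : Nat) (stack : List (Int × Int × List Int))
    (tin low : List Int) (res : Int) : Option (Int × List Int) :=
  match stack with
  | [] => some (res, tin)
  | (v, prev, []) :: S =>
    -- to is None: pop the frame, fold low[v] into the parent (or into res at the bottom)
    let lv := low.getD (pyIx v g.length) 0
    let r := if lv = tin.getD (pyIx v g.length) 0 ∧ prev ≠ -1 then -1 else lv
    match S with
    | [] => runB g fuel [] tin low r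
    | fr :: S' =>
      runB g fuel (fr :: S') tin
        (low.set (pyIx prev g.length) (min (low.getD (pyIx prev g.length) 0) r)) res
  | (v, prev, u :: rest) :: S =>
    if u = prev then runB g fuel ((v, prev, rest) :: S) tin low res
    else if tin.getD (pyIx u g.length) 0 ≠ -1 then
      runB g fuel ((v, prev, rest) :: S) tin
        (low.set (pyIx v g.length)
          (min (low.getD (pyIx v g.length) 0) (tin.getD (pyIx u g.length) 0))) res
    else
      match fuel with
      | 0 => none
      | f + 1 =>
        let t := tin.getD (pyIx v g.length) 0 + 1
        runB g f ((u, v, g.getD (pyIx u g.length) []) :: (v, prev, rest) :: S)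
          (tin.set (pyIx u g.length) t) (low.set (pyIx u g.length) t) res
termination_by (fuel, (stack.map (fun f => f.2.2.length + 1)).sum)
decreasing_by all_goals (simp; omega)

def two_edge_connected_alt (graph : List (List Int)) : Bool :=
  let n := graph.length
  let tin := (List.replicate n (-1 : Int)).set 0 0
  let low := (List.replicate n (-1 : Int)).set 0 0
  match runB graph n [(0, -1, graph.getD (pyIx 0 n) [])] tin low 0 with
  | none => false
  | some (res, tinf) =>
    if res = -1 then false
    else tinf.all (fun t => decide (t ≥ 0))

-- ===== PRECONDITION & SPEC =====
-- One expansion step of the conservative reachability closure from vertex 0: add the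
-- (Python-normalised) in-range targets of every entry of every already-reached row.
def pvStep (g : List (List Int)) (s : Finset Nat) : Finset Nat :=
  s ∪ s.biUnion (fun v =>
    ((g.getD v []).filterMap (fun u =>
      if -(g.length : Int) ≤ u ∧ u < g.length then some (pyIx u g.length) else none)).toFinset)

def pvReach (g : List (List Int)) : Finset Nat := (pvStep g)^[g.length] {0}

-- Pre_ excludes the empty graph (A raises IndexError on graph[0]) and graphs in which some
-- conservatively-reachable row has an entry outside [-len(graph), len(graph)): reading such an
-- entry makes A raise IndexError.  The closure ignores A's `to == prev` edge skips, so a few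
-- inputs whose bad rows are never actually scanned (A returns there) are also excluded.
def Pre_two_edge_connected (graph : List (List Int)) : Prop :=
  graph ≠ [] ∧ ∀ v ∈ pvReach graph, ∀ u ∈ graph.getD v [],
    -(graph.length : Int) ≤ u ∧ u < graph.length
instance (graph : List (List Int)) : Decidable (Pre_two_edge_connected graph) := by
  unfold Pre_two_edge_connected; infer_instance

def pvWitness_two_edge_connected : List (List Int) := [[1, 1], [0, 0]]

def Spec_two_edge_connected (graph : List (List Int)) (out : Bool) : Prop := out = two_edge_connected_alt graph
instance (graph : List (List Int)) (out : Bool) : Decidable (Spec_two_edge_connected graph out) := by unfold Spec_two_edge_connected; infer_instance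

-- ===== CLAIM (what is proved, stated in full; the proofs are below) =====
def Claim_equal_two_edge_connected : Prop := ∀ (graph : List (List Int)), Dom_two_edge_connected graph → Pre_two_edge_connected graph → Spec_two_edge_connected graph (two_edge_connected graph)

-- ===== LEMMAS AND PROOFS =====

theorem pyIx_lt (u : Int) (n : Nat) (h1 : -(n : Int) ≤ u) (h2 : u < n) : pyIx u n < n := by
  unfold pyIx
  split <;> omega

theorem pv_getD_set_self (l : List Int) (i : Nat) (x : Int) (h : i < l.length) :
    (l.set i x).getD i 0 = x := by
  simp [List.getD_eq_getElem?_getD, h]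

theorem pv_getD_set_ne (l : List Int) (i j : Nat) (x : Int) (h : i ≠ j) :
    (l.set i x).getD j 0 = l.getD j 0 := by
  simp [List.getD_eq_getElem?_getD, List.getElem?_set_ne h]

theorem pv_count_set (l : List Int) (i : Nat) (x : Int) (hi : i < l.length)
    (hl : l.getD i 0 = -1) (hx : x ≠ -1) :
    (l.set i x).count (-1) + 1 = l.count (-1) := by
  induction l generalizing i with
  | nil => simp at hi
  | cons a as ih =>
    cases i with
    | zero =>
      simp [List.getD] at hl
      simp [hl, hx]
    | succ j =>
      simp at hi
      simp [List.getD] at hl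
      have := ih j hi hl
      simp [List.count_cons]
      omega

theorem pv_count_pos (l : List Int) (i : Nat) (hi : i < l.length) (hl : l.getD i 0 = -1) :
    1 ≤ l.count (-1) := by
  have hm : (-1 : Int) ∈ l := by
    have := List.getD_eq_getElem l 0 hi
    rw [this] at hl
    exact hl ▸ List.getElem_mem hi
  have := List.count_pos_iff.mpr hm
  omega

theorem pvStep_subset (g : List (List Int)) (s : Finset Nat) : s ⊆ pvStep g s :=
  Finset.subset_union_left

theorem pvStep_range (g : List (List Int)) {s : Finset Nat}
    (h : s ⊆ Finset.range g.length) : pvStep g s ⊆ Finset.range g.length := by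
  apply Finset.union_subset h
  intro x hx
  rw [Finset.mem_biUnion] at hx
  obtain ⟨v, _, hx⟩ := hx
  rw [List.mem_toFinset, List.mem_filterMap] at hx
  obtain ⟨u, _, hu⟩ := hx
  rw [Finset.mem_range]
  by_cases hc : -(g.length : Int) ≤ u ∧ u < g.length
  · rw [if_pos hc] at hu
    cases hu
    exact pyIx_lt u g.length hc.1 hc.2
  · rw [if_neg hc] at hu
    cases hu

theorem pvReach_zero_mem (g : List (List Int)) : 0 ∈ pvReach g := by
  unfold pvReach
  have : ∀ k, 0 ∈ (pvStep g)^[k] {0} := by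
    intro k
    induction k with
    | zero => simp
    | succ k ih =>
      rw [Function.iterate_succ_apply']
      exact pvStep_subset g _ ih
  exact this g.length

theorem pvReach_fixed (g : List (List Int)) (hn : 1 ≤ g.length) :
    pvStep g (pvReach g) = pvReach g := by
  by_cases hstall : ∃ k < g.length, (pvStep g)^[k + 1] {0} = (pvStep g)^[k] {0}
  · obtain ⟨k, hk, hfix⟩ := hstall
    rw [Function.iterate_succ_apply'] at hfix
    have hstay : ∀ m, (pvStep g)^[k + m] {0} = (pvStep g)^[k] {0} := by
      intro m
      induction m with
      | zero => rfl
      | succ m ih =>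
        have : k + (m + 1) = (k + m) + 1 := by omega
        rw [this, Function.iterate_succ_apply', ih, hfix]
    have hreach : pvReach g = (pvStep g)^[k] {0} := by
      unfold pvReach
      have : g.length = k + (g.length - k) := by omega
      rw [this, hstay]
    rw [hreach, hfix]
  · exfalso
    push_neg at hstall
    have hgrow : ∀ k ≤ g.length, k + 1 ≤ ((pvStep g)^[k] {0}).card := by
      intro k
      induction k with
      | zero => simp
      | succ k ih =>
        intro hk
        have hss : (pvStep g)^[k] {0} ⊂ (pvStep g)^[k + 1] {0} := by
          refine ⟨by rw [Function.iterate_succ_apply']; exact pvStep_subset g _, ?_⟩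
          intro hle
          exact hstall k (by omega)
            (Finset.Subset.antisymm (by rw [Function.iterate_succ_apply'] at hle ⊢; exact hle)
              (by rw [Function.iterate_succ_apply']; exact pvStep_subset g _))
        have := Finset.card_lt_card hss
        have := ih (by omega)
        omega
    have hb : ∀ k, (pvStep g)^[k] {0} ⊆ Finset.range g.length := by
      intro k
      induction k with
      | zero => simp [Finset.singleton_subset_iff, Finset.mem_range]; omega
      | succ k ih =>
        rw [Function.iterate_succ_apply']
        exact pvStep_range g ih
    have h1 := hgrow g.length (le_refl _)
    have h2 := Finset.card_le_card (hb g.length)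
    rw [Finset.card_range] at h2
    omega

theorem pvReach_closed (g : List (List Int)) (hn : 1 ≤ g.length) (v : Nat)
    (hv : v ∈ pvReach g) (u : Int) (hu : u ∈ g.getD v []) (h1 : -(g.length : Int) ≤ u)
    (h2 : u < g.length) : pyIx u g.length ∈ pvReach g := by
  rw [← pvReach_fixed g hn]
  unfold pvStep
  apply Finset.mem_union_right
  rw [Finset.mem_biUnion]
  refine ⟨v, hv, ?_⟩
  rw [List.mem_toFinset, List.mem_filterMap]
  exact ⟨u, hu, by rw [if_pos ⟨h1, h2⟩]⟩

theorem sim_loop (g : List (List Int))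
    (hg : ∀ v ∈ pvReach g, ∀ u ∈ g.getD v [], -(g.length : Int) ≤ u ∧ u < (g.length : Int)) :
    ∀ (fuel : Nat) (v prev time : Int) (ns : List Int) (vt : Int) (tin : List Int),
    (∀ u ∈ ns, u ∈ g.getD (pyIx v g.length) []) →
    pyIx v g.length ∈ pvReach g →
    -(g.length : Int) ≤ v → v < (g.length : Int) →
    tin.length = g.length →
    tin.getD (pyIx v g.length) 0 = time →
    0 ≤ time →
    tin.count (-1) ≤ fuel →
    ∃ vtf tinf,
      dfsLoopA fuel g v prev time ns vt tin = some (vtf, tinf) ∧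
      tinf.length = g.length ∧
      (∀ i : Nat, tin.getD i 0 ≠ -1 → tinf.getD i 0 = tin.getD i 0) ∧
      tinf.count (-1) ≤ tin.count (-1) ∧
      ∀ (S : List (Int × Int × List Int)) (low : List Int) (res : Int) (fB : Nat),
        low.length = g.length → low.getD (pyIx v g.length) 0 = vt →
        ∃ low', low'.length = g.length ∧ low'.getD (pyIx v g.length) 0 = vtf ∧
          (∀ i : Nat, i ≠ pyIx v g.length → tin.getD i 0 ≠ -1 → low'.getD i 0 = low.getD i 0) ∧
          runB g (tin.count (-1) + fB) ((v, prev, ns) :: S) tin low res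
            = runB g (tinf.count (-1) + fB) ((v, prev, []) :: S) tinf low' res := by
  intro fuel
  induction fuel using Nat.strong_induction_on with
  | _ fuel ihf =>
  intro v prev time ns
  induction ns with
  | nil =>
    intro vt tin _ _ hv1 hv2 hlen htv htime hfuel
    refine ⟨vt, tin, by rw [dfsLoopA], hlen, fun i _ => rfl, le_refl _, ?_⟩
    intro S low res fB hl hlv
    exact ⟨low, hl, hlv, fun i _ _ => rfl, rfl⟩
  | cons u rest ihns =>
    intro vt tin hns hvR hv1 hv2 hlen htv htime hfuel
    have hnr : ∀ x ∈ rest, x ∈ g.getD (pyIx v g.length) [] :=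
      fun x hx => hns x (List.mem_cons_of_mem _ hx)
    have hvnat : pyIx v g.length < g.length := pyIx_lt v g.length hv1 hv2
    by_cases hup : u = prev
    · obtain ⟨vtf, tinf, h1, h2, h3, h4, hsim⟩ := ihns vt tin hnr hvR hv1 hv2 hlen htv htime hfuel
      refine ⟨vtf, tinf, ?_, h2, h3, h4, ?_⟩
      · rw [dfsLoopA]; simp [hup, h1]
      · intro S low res fB hl hlv
        obtain ⟨low', p1, p2, p3, heq⟩ := hsim S low res fB hl hlv
        refine ⟨low', p1, p2, p3, ?_⟩
        rw [← heq]
        rw [runB.eq_def]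
        simp [hup]
    · have hu := hg _ hvR u (hns u List.mem_cons_self)
      have hunat : pyIx u g.length < g.length := pyIx_lt u g.length hu.1 hu.2
      by_cases hm : tin.getD (pyIx u g.length) 0 = -1
      · -- unvisited neighbour: recursive call dfs(to, v, time+1) / stack push
        have huR : pyIx u g.length ∈ pvReach g :=
          pvReach_closed g (by omega) _ hvR u (hns u List.mem_cons_self) hu.1 hu.2
        have hvune : pyIx v g.length ≠ pyIx u g.length := by
          intro h
          rw [← h, htv] at hm
          omega
        have hm2 : tin[pyIx u g.length]?.getD 0 = (-1 : Int) := by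
          simpa [List.getD_eq_getElem?_getD] using hm
        have htv2 : tin[pyIx v g.length]?.getD 0 = time := by
          simpa [List.getD_eq_getElem?_getD] using htv
        have hc1 : 1 ≤ tin.count (-1) := pv_count_pos tin (pyIx u g.length) (by omega) hm
        obtain ⟨f, rfl⟩ : ∃ f, fuel = f + 1 := ⟨fuel - 1, by omega⟩
        have hcset : (tin.set (pyIx u g.length) (time + 1)).count (-1) + 1 = tin.count (-1) :=
          pv_count_set tin (pyIx u g.length) (time + 1) (by omega) hm (by omega)
        have hgu : g.getD (pyIx u g.length) [] = g[pyIx u g.length] :=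
          List.getD_eq_getElem g [] hunat
        obtain ⟨vtc, tinc, hAc, hlenc, hmonoc, hcntc, hsimc⟩ :=
          ihf f (by omega) u v (time + 1) (g.getD (pyIx u g.length) []) (time + 1)
            (tin.set (pyIx u g.length) (time + 1)) (fun x hx => hx) huR hu.1 hu.2
            (by simp [hlen]) (pv_getD_set_self _ _ _ (by omega)) (by omega) (by omega)
        have htcv : tinc.getD (pyIx v g.length) 0 = time := by
          rw [hmonoc _ (by rw [pv_getD_set_ne _ _ _ _ (fun h => hvune h.symm), htv]; omega),
            pv_getD_set_ne _ _ _ _ (fun h => hvune h.symm), htv]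
        have htcu : tinc.getD (pyIx u g.length) 0 = time + 1 := by
          rw [hmonoc _ (by rw [pv_getD_set_self _ _ _ (by omega)]; omega),
            pv_getD_set_self _ _ _ (by omega)]
        have hrc : dfsA (f + 1) g u v (time + 1) tin =
            some (if vtc = time + 1 ∧ v ≠ -1 then -1 else vtc, tinc) := by
          have hAc2 : dfsLoopA f g u v (time + 1) (g[pyIx u g.length]?.getD [])
              (time + 1) (tin.set (pyIx u g.length) (time + 1)) = some (vtc, tinc) := by
            simpa [List.getD_eq_getElem?_getD] using hAc
          rw [dfsA.eq_def]
          simp [hAc2]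
          split_ifs <;> simp
        obtain ⟨vtf, tinf, h1, h2, h3, h4, hsim⟩ :=
          ihns (min vt (if vtc = time + 1 ∧ v ≠ -1 then -1 else vtc)) tinc hnr hvR hv1 hv2
            hlenc htcv htime (by omega)
        refine ⟨vtf, tinf, ?_, h2, ?_, by omega, ?_⟩
        · rw [dfsLoopA]
          simp [hup, hm2, hrc, h1]
        · -- entries ≠ -1 are preserved through child and rest
          intro i hi
          have hiu : i ≠ pyIx u g.length := by
            intro h; rw [h, hm] at hi; exact hi rfl
          have hset : (tin.set (pyIx u g.length) (time + 1)).getD i 0 = tin.getD i 0 :=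
            pv_getD_set_ne _ _ _ _ (fun h => hiu h.symm)
          have hci : tinc.getD i 0 = tin.getD i 0 := by
            rw [hmonoc i (by rw [hset]; exact hi), hset]
          rw [h3 i (by rw [hci]; exact hi), hci]
        · -- machine simulation: push, child segment, pop-and-fold, rest
          intro S low res fB hl hlv
          obtain ⟨lowc, q1, q2, q3, heqc⟩ := hsimc ((v, prev, rest) :: S)
            (low.set (pyIx u g.length) (time + 1)) res fB (by simp [hl])
            (pv_getD_set_self _ _ _ (by omega))
          have hlcv : lowc.getD (pyIx v g.length) 0 = vt := by
            rw [q3 _ hvune (by rw [pv_getD_set_ne _ _ _ _ (fun h => hvune h.symm), htv]; omega),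
              pv_getD_set_ne _ _ _ _ (fun h => hvune h.symm), hlv]
          obtain ⟨low', p1, p2, p3, heq⟩ := hsim S
            (lowc.set (pyIx v g.length) (min vt (if vtc = time + 1 ∧ v ≠ -1 then -1 else vtc)))
            res fB (by simp [q1]) (pv_getD_set_self _ _ _ (by omega))
          refine ⟨low', p1, p2, ?_, ?_⟩
          · intro i hiv hine
            have hiu : i ≠ pyIx u g.length := by
              intro h; rw [h, hm] at hine; exact hine rfl
            have hset : (tin.set (pyIx u g.length) (time + 1)).getD i 0 = tin.getD i 0 :=
              pv_getD_set_ne _ _ _ _ (fun h => hiu h.symm)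
            have hci : tinc.getD i 0 = tin.getD i 0 := by
              rw [hmonoc i (by rw [hset]; exact hine), hset]
            rw [p3 i hiv (by rw [hci]; exact hine),
              pv_getD_set_ne _ _ _ _ (fun h => hiv h.symm),
              q3 i hiu (by rw [hset]; exact hine),
              pv_getD_set_ne _ _ _ _ (fun h => hiu h.symm)]
          · -- chain the four machine segments
            have step1 : runB g (tin.count (-1) + fB) ((v, prev, u :: rest) :: S) tin low res =
                runB g ((tin.set (pyIx u g.length) (time + 1)).count (-1) + fB)
                  ((u, v, g.getD (pyIx u g.length) []) :: (v, prev, rest) :: S)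
                  (tin.set (pyIx u g.length) (time + 1))
                  (low.set (pyIx u g.length) (time + 1)) res := by
              rw [runB.eq_def]
              have hfe : tin.count (-1) + fB =
                  ((tin.set (pyIx u g.length) (time + 1)).count (-1) + fB) + 1 := by
                omega
              rw [hfe]
              simp [hup, hm2, htv2]
            have step3 : runB g (tinc.count (-1) + fB)
                  ((u, v, []) :: (v, prev, rest) :: S) tinc lowc res =
                runB g (tinc.count (-1) + fB) ((v, prev, rest) :: S) tinc
                  (lowc.set (pyIx v g.length)
                    (min vt (if vtc = time + 1 ∧ v ≠ -1 then -1 else vtc))) res := by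
              rw [runB.eq_def]
              simp only [q2, htcu, hlcv]
            rw [step1, heqc, step3, heq]
      · -- neighbour already visited: v_time = min(v_time, time_in[to])
        have hm2 : ¬ tin[pyIx u g.length]?.getD 0 = (-1 : Int) := by
          simpa [List.getD_eq_getElem?_getD] using hm
        obtain ⟨vtf, tinf, h1, h2, h3, h4, hsim⟩ :=
          ihns (min vt (tin.getD (pyIx u g.length) 0)) tin hnr hvR hv1 hv2 hlen htv htime hfuel
        refine ⟨vtf, tinf, ?_, h2, h3, h4, ?_⟩
        · rw [dfsLoopA]; simp [hup, hm2]; simpa using h1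
        · intro S low res fB hl hlv
          obtain ⟨low', p1, p2, p3, heq⟩ := hsim S
            (low.set (pyIx v g.length) (min vt (tin.getD (pyIx u g.length) 0))) res fB
            (by simp [hl]) (pv_getD_set_self _ _ _ (by omega))
          refine ⟨low', p1, p2, ?_, ?_⟩
          · intro i hiv hine
            rw [p3 i hiv hine, pv_getD_set_ne _ _ _ _ (fun h => hiv h.symm)]
          · have hlv2 : low[pyIx v g.length]?.getD 0 = vt := by
              simpa [List.getD_eq_getElem?_getD] using hlv
            have step : runB g (List.count (-1) tin + fB) ((v, prev, u :: rest) :: S) tin low res =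
                runB g (List.count (-1) tin + fB) ((v, prev, rest) :: S) tin
                  (low.set (pyIx v g.length) (min vt (tin.getD (pyIx u g.length) 0))) res := by
              rw [runB.eq_def]
              simp [hup, hm2, hlv2]
            rw [step, heq]

-- ===== VERDICT (by name: the statement is the Claim_ definition above) =====
theorem two_edge_connected_spec : Claim_equal_two_edge_connected := by
  intro graph _ hpre
  obtain ⟨hne, hb⟩ := hpre
  have hn1 : 1 ≤ graph.length := by
    cases graph with
    | nil => exact absurd rfl hne
    | cons a l => simp
  unfold Spec_two_edge_connected
  set tin1 : List Int := (List.replicate graph.length (-1)).set 0 0 with htin1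
  have hlen1 : tin1.length = graph.length := by simp [htin1]
  have hrepD : (List.replicate graph.length (-1 : Int)).getD 0 0 = -1 := by
    rw [List.getD_eq_getElem _ _ (by simp; omega)]
    simp
  have htv1 : tin1.getD 0 0 = 0 :=
    pv_getD_set_self _ _ _ (by simp; omega)
  have hcnt1 : tin1.count (-1) + 1 = graph.length := by
    have := pv_count_set (List.replicate graph.length (-1)) 0 0 (by simp; omega) hrepD (by omega)
    rw [htin1, this, List.count_replicate]
    simp
  have hix0 : pyIx 0 graph.length = 0 := by unfold pyIx; simp
  obtain ⟨vtf, tinf, hLoop, hlenf, hmono, hcnt, hsim⟩ :=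
    sim_loop graph hb graph.length 0 (-1) 0 (graph.getD (pyIx 0 graph.length) []) 0 tin1
      (fun x hx => hx) (by rw [hix0]; exact pvReach_zero_mem graph)
      (by omega) (by omega) hlen1 (by rw [hix0]; exact htv1) (le_refl 0) (by omega)
  obtain ⟨low', hp1, hp2, _, heq⟩ := hsim [] tin1 0 1 hlen1 (by rw [hix0]; exact htv1)
  have hA : two_edge_connected graph =
      (if vtf = -1 then false else tinf.all fun el => decide (el ≥ 0)) := by
    unfold two_edge_connected
    rw [dfsA.eq_def]
    have hLoop2 := hLoop
    simp only [List.getD_eq_getElem?_getD, hix0] at hLoop2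
    simp [← htin1, hix0, hLoop2]
  have hp2' : low'[(0 : Nat)]?.getD 0 = vtf := by
    have := hp2
    rw [hix0] at this
    simpa [List.getD_eq_getElem?_getD] using this
  have hpop : runB graph (tinf.count (-1) + 1) [((0 : Int), (-1 : Int), ([] : List Int))]
      tinf low' 0 = some (vtf, tinf) := by
    rw [runB.eq_def]
    simp [hix0, hp2']
    rw [runB.eq_def]
  have hB : two_edge_connected_alt graph =
      (if vtf = -1 then false else tinf.all fun el => decide (el ≥ 0)) := by
    unfold two_edge_connected_alt
    simp only [← htin1, hix0]
    rw [hix0] at heq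
    have hfe : graph.length = tin1.count (-1) + 1 := by omega
    rw [hfe, heq, hpop]
  rw [hA, hB]
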